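-- pv_equiv track=rewrite | github.com/fLexsooP/Leetcode-Learning | TwoPointer/longest-substring-with-at-most-K-normal-char.py | maxNormalSubstring
-- ===== SOURCE A (Python) =====
-- def maxNormalSubstring(P, Q, K):
--     if (K == 0):
--         return 0
--     # count of normal characters
--     count = 0
--
--     left, right = 0, 0
--     N = len(P)
--     ans = 0
--
--     while (right < N):
--         while (right < N and count <= K):
--
--             # get position of character
--             pos = ord(P[right]) - ord('a')
--
--             # check if current character is normal
--             if (Q[pos] == '0'):
--
--                 # check if normal characters
--                 # count exceeds K
--                 if (count + 1 > K):
--                     break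
--                 else:
--                     count += 1
--
--             right += 1
--
--             # update answer with substring length
--             if (count <= K):
--                 ans = max(ans, right - left)
--
--         while left < right and count >= K:
--
--             # get position of character
--             pos = ord(P[left]) - ord('a')
--
--             left += 1
--
--             # check if character is
--             # normal then decrement count
--             if (Q[pos] == '0'):
--                 count -= 1
--
--     return ans
-- ===== SOURCE B (Python) =====
-- def maxNormalSubstring(P, Q, K):
--     if K == 0:
--         return 0
--     n = len(P)
--     cnt = [0] * (n + 1)
--     for i in range(n):
--         pos = ord(P[i]) - ord('a')
--         cnt[i + 1] = cnt[i] + (1 if Q[pos] == '0' else 0)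
--     ans = 0
--     for r in range(1, n + 1):
--         # least l with cnt[r] - cnt[l] <= K, by binary search on the
--         # nondecreasing prefix array
--         target = cnt[r] - K
--         lo, hi = 0, r
--         while lo < hi:
--             mid = (lo + hi) // 2
--             if cnt[mid] < target:
--                 lo = mid + 1
--             else:
--                 hi = mid
--         ans = max(ans, r - lo)
--     return ans
-- ===== Notes on version B (the rewrite author's own statement) =====
-- stated objective: alternative
-- what changed: Replaces the two-pointer sliding-window scan by a prefix-count array plus, for each endpoint r, a hand-written binary search for the least window start l with cnt[r]-cnt[l] <= K.
-- outside the precondition, e.g. on maxNormalSubstring('ab', '01', -1): A does not finish within the time limit, B returns 0; on maxNormalSubstring(' b', '01', 1): A raises IndexError, B raises IndexError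
import Mathlib
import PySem

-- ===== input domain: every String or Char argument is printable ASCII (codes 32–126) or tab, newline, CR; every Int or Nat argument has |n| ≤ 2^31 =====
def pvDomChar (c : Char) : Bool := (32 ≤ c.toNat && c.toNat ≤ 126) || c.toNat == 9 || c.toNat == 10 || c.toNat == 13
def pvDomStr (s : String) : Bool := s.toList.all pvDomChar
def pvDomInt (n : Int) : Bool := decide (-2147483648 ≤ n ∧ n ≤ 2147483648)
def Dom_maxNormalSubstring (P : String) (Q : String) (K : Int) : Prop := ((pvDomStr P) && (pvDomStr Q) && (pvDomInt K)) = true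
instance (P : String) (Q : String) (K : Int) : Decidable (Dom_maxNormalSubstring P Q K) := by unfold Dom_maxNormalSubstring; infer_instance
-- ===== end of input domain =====

-- B replaces A's two-pointer sliding window by a prefix-count array plus a binary
-- search (for each endpoint) for the least admissible window start; same results.

-- ===== PORT A =====

-- Q[pos] == '0'  (pyGet? = none means Python would raise IndexError; excluded by Pre_)
def pvIsZero (Q : String) (pos : Int) : Bool := PySem.Str.pyGet? Q pos == some '0'

-- ord(P[i])  (in-range under Pre_; the default is never reached inside Pre_)
def pvOrdAt (P : String) (i : Int) : Int :=
  match PySem.Str.pyGet? P i with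
  | some c => (c.toNat : Int)
  | none => 0

-- inner while: right < N and count <= K  (returns (right, count, ans))
def pvLoop1 (P Q : String) (K N left : Int) (right count ans : Int) : Int × Int × Int :=
  if _h : right < N ∧ count ≤ K then
    let pos := pvOrdAt P right - 97
    if pvIsZero Q pos ∧ count + 1 > K then (right, count, ans)
    else
      let count' := if pvIsZero Q pos then count + 1 else count
      let right' := right + 1
      let ans' := if count' ≤ K then max ans (right' - left) else ans
      pvLoop1 P Q K N left right' count' ans'
  else (right, count, ans)
termination_by (N - right).toNat
decreasing_by omega

-- second while: left < right and count >= K  (returns (left, count))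
def pvLoop2 (P Q : String) (K right : Int) (left count : Int) : Int × Int :=
  if _h : left < right ∧ count ≥ K then
    let pos := pvOrdAt P left - 97
    let left' := left + 1
    let count' := if pvIsZero Q pos then count - 1 else count
    pvLoop2 P Q K right left' count'
  else (left, count)
termination_by (right - left).toNat
decreasing_by omega

-- outer while right < N; fuel only makes the loop total (N+1 iterations suffice under Pre_)
def pvOuter (P Q : String) (K N : Int) : Nat → Int → Int → Int → Int → Int
  | 0, _, _, _, ans => ans
  | fuel + 1, left, right, count, ans =>
    if right < N then
      let r1 := pvLoop1 P Q K N left right count ans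
      let r2 := pvLoop2 P Q K r1.1 left r1.2.1
      pvOuter P Q K N fuel r2.1 r1.1 r2.2 r1.2.2
    else ans

def maxNormalSubstring (P : String) (Q : String) (K : Int) : Int :=
  if K = 0 then 0
  else pvOuter P Q K (P.toList.length : Int) (P.toList.length + 1) 0 0 0 0

-- ===== PORT B =====

-- cnt[1..]: cnt[i+1] = cnt[i] + (1 if Q[ord(P[i])-ord('a')] == '0' else 0)
def pvCntFrom (Q : String) (acc : Int) : List Char → List Int
  | [] => []
  | c :: cs =>
    let pos := (c.toNat : Int) - 97
    let acc' := acc + (if pvIsZero Q pos then 1 else 0)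
    acc' :: pvCntFrom Q acc' cs

def pvCnt (P Q : String) : List Int := 0 :: pvCntFrom Q 0 P.toList

-- while lo < hi: mid = (lo+hi)//2; if cnt[mid] < target: lo = mid+1 else hi = mid
def pvBisect (cnt : List Int) (target lo hi : Int) : Int :=
  if h : lo < hi then
    let mid := PySem.Int.floordiv (lo + hi) 2
    if PySem.List.pyGetD cnt mid 0 < target then pvBisect cnt target (mid + 1) hi
    else pvBisect cnt target lo mid
  else lo
termination_by (hi - lo).toNat
decreasing_by
  all_goals
    have h1 := (PySem.Int.floordiv_lt_iff_lt_mul (a := lo + hi) (b := 2) (q := hi)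
      (by omega)).mpr (by omega)
    have h2 := (PySem.Int.le_floordiv_iff_mul_le (a := lo + hi) (b := 2) (q := lo)
      (by omega)).mpr (by omega)
    omega

def maxNormalSubstring_alt (P : String) (Q : String) (K : Int) : Int :=
  if K = 0 then 0
  else
    let n : Int := (P.toList.length : Int)
    let cnt := pvCnt P Q
    (PySem.List.pyRange 1 (n + 1) 1).foldl
      (fun ans r => max ans (r - pvBisect cnt (PySem.List.pyGetD cnt r 0 - K) 0 r)) 0

-- ===== PRECONDITION & SPEC =====
-- Pre_ excludes exactly the inputs where Python A does not return: K < 0 with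
-- nonempty P makes A's outer loop spin forever, and (for K ≠ 0, P nonempty) a
-- character whose index ord(c)-97 falls outside Q makes Q[pos] raise IndexError.
def Pre_maxNormalSubstring (P : String) (Q : String) (K : Int) : Prop :=
  K = 0 ∨ P.toList = [] ∨
    (0 < K ∧ (P.toList.all fun c =>
      -(Q.toList.length : Int) ≤ (c.toNat : Int) - 97 &&
        (c.toNat : Int) - 97 < (Q.toList.length : Int)) = true)
instance (P : String) (Q : String) (K : Int) : Decidable (Pre_maxNormalSubstring P Q K) := by
  unfold Pre_maxNormalSubstring; infer_instance

def pvWitness_maxNormalSubstring : String × String × Int := ("ab", "01", 1)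

def Spec_maxNormalSubstring (P : String) (Q : String) (K : Int) (out : Int) : Prop := out = maxNormalSubstring_alt P Q K
instance (P : String) (Q : String) (K : Int) (out : Int) : Decidable (Spec_maxNormalSubstring P Q K out) := by unfold Spec_maxNormalSubstring; infer_instance

-- ===== CLAIM (what is proved, stated in full; the proofs are below) =====
def Claim_equal_maxNormalSubstring : Prop := ∀ (P : String) (Q : String) (K : Int), Dom_maxNormalSubstring P Q K → Pre_maxNormalSubstring P Q K → Spec_maxNormalSubstring P Q K (maxNormalSubstring P Q K)

-- ===== LEMMAS AND PROOFS =====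

-- is-normal test on a character (what both ports compute for a character of P)
def pvIsNormC (Q : String) (c : Char) : Bool := pvIsZero Q ((c.toNat : Int) - 97)

-- prefix count of normal characters, as a function of an Int bound
def pvC (P Q : String) (i : Int) : Int := ((P.toList.take i.toNat).countP (pvIsNormC Q) : Int)

-- the per-endpoint term B computes
def pvTerm (P Q : String) (K r : Int) : Int :=
  r - pvBisect (pvCnt P Q) (PySem.List.pyGetD (pvCnt P Q) r 0 - K) 0 r

lemma pvC_mono (P Q : String) (i j : Int) (h : i ≤ j) : pvC P Q i ≤ pvC P Q j := by
  unfold pvC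
  have hij : i.toNat ≤ j.toNat := Int.toNat_le_toNat h
  have h1 : P.toList.take i.toNat = (P.toList.take j.toNat).take i.toNat := by
    rw [List.take_take, Nat.min_eq_left hij]
  rw [h1]
  exact_mod_cast List.Sublist.countP_le (List.take_sublist _ _)

lemma pvC_step (P Q : String) (i : Int) (h0 : 0 ≤ i) (hn : i < (P.toList.length : Int)) :
    pvC P Q (i + 1) = pvC P Q i + (if pvIsNormC Q (P.toList.get ⟨i.toNat, by omega⟩) then 1 else 0) := by
  unfold pvC
  have hlt : i.toNat < P.toList.length := by omega
  rw [show (i + 1).toNat = i.toNat + 1 by omega, List.take_succ,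
    List.getElem?_eq_getElem hlt, List.countP_append]
  simp [List.get_eq_getElem, List.countP_cons]

lemma pvNormAt_eq (P Q : String) (i : Int) (h0 : 0 ≤ i) (hn : i < (P.toList.length : Int)) :
    pvIsZero Q (pvOrdAt P i - 97) = pvIsNormC Q (P.toList.get ⟨i.toNat, by omega⟩) := by
  have hlt : i.toNat < P.toList.length := by omega
  have hg : PySem.List.pyGet? P.toList i = some P.toList[i.toNat] :=
    PySem.List.pyGet?_eq_some_getElem P.toList h0 hn
  simp [pvOrdAt, pvIsNormC, hg]

lemma pvCntFrom_length (Q : String) (acc : Int) (cs : List Char) :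
    (pvCntFrom Q acc cs).length = cs.length := by
  induction cs generalizing acc with
  | nil => rfl
  | cons c cs ih => simp [pvCntFrom, ih]

lemma pvCntFrom_get (Q : String) (cs : List Char) (acc : Int) (i : Nat) (h : i < cs.length) :
    (pvCntFrom Q acc cs)[i]? = some (acc + ((cs.take (i + 1)).countP (pvIsNormC Q) : Int)) := by
  induction cs generalizing acc i with
  | nil => simp at h
  | cons c cs ih =>
    cases i with
    | zero =>
      simp [pvCntFrom, List.countP_cons, pvIsNormC]
    | succ j =>
      have hj : j < cs.length := by simpa using h
      simp only [pvCntFrom, List.getElem?_cons_succ, ih _ j hj, List.take_succ_cons,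
        List.countP_cons, pvIsNormC]
      congr 1
      split_ifs <;> push_cast <;> ring

lemma pvCnt_getN (P Q : String) (i : Nat) (h : i ≤ P.toList.length) :
    (pvCnt P Q)[i]? = some (((P.toList.take i).countP (pvIsNormC Q) : Int)) := by
  cases i with
  | zero => simp [pvCnt]
  | succ j =>
    have hj : j < P.toList.length := by omega
    show (0 :: pvCntFrom Q 0 P.toList)[j + 1]? = _
    rw [List.getElem?_cons_succ, pvCntFrom_get Q P.toList 0 j hj]
    simp

lemma pvCnt_get (P Q : String) (i : Int) (h0 : 0 ≤ i) (hn : i ≤ (P.toList.length : Int)) :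
    PySem.List.pyGetD (pvCnt P Q) i 0 = pvC P Q i := by
  have hlen : (pvCnt P Q).length = P.toList.length + 1 := by
    simp [pvCnt, pvCntFrom_length]
  have hlt : i.toNat < (pvCnt P Q).length := by rw [hlen]; omega
  have h1 := pvCnt_getN P Q i.toNat (by omega)
  have h2 := List.getElem?_eq_getElem hlt
  rw [PySem.List.pyGetD_eq_getElem _ _ h0 (by push_cast [hlen]; omega)]
  exact Option.some.inj (h2.symm.trans h1)

lemma pvBisect_eq (cnt : List Int) (n t L : Int)
    (hbelow : ∀ p : Int, 0 ≤ p → p < L → PySem.List.pyGetD cnt p 0 < t)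
    (habove : ∀ p : Int, L ≤ p → p ≤ n → t ≤ PySem.List.pyGetD cnt p 0) :
    ∀ (m : Nat) (lo hi : Int), (hi - lo).toNat = m → 0 ≤ lo → lo ≤ L → L ≤ hi → hi ≤ n →
    pvBisect cnt t lo hi = L := by
  intro m
  induction m using Nat.strong_induction_on with
  | _ m ih =>
    intro lo hi hm hlo hL1 hL2 hhi
    rw [pvBisect]
    by_cases hlt : lo < hi
    · rw [dif_pos hlt]
      have hmid := PySem.Int.floordiv_two_mid_bounds (le_of_lt hlt)
      have hmidlt : PySem.Int.floordiv (lo + hi) 2 < hi :=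
        (PySem.Int.floordiv_lt_iff_lt_mul (a := lo + hi) (b := 2) (q := hi)
          (by omega)).mpr (by omega)
      set mid := PySem.Int.floordiv (lo + hi) 2 with hmiddef
      by_cases hc : PySem.List.pyGetD cnt mid 0 < t
      · rw [if_pos hc]
        have hmidL : mid < L := by
          by_contra hcon
          exact absurd (habove mid (by omega) (by omega)) (by omega)
        exact ih (hi - (mid + 1)).toNat (by omega) (mid + 1) hi rfl (by omega) (by omega)
          (by omega) (by omega)
      · rw [if_neg hc]
        have hmidL : L ≤ mid := by
          by_contra hcon
          exact absurd (hbelow mid (by omega) (by omega)) (by omega)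
        exact ih (mid - lo).toNat (by omega) lo mid rfl (by omega) (by omega)
          (by omega) (by omega)
    · rw [dif_neg hlt]
      omega

-- the bisect term equals r - l whenever l is the least admissible start for endpoint r
lemma pvTerm_eq (P Q : String) (K l r : Int) (h0 : 0 ≤ l) (hlr : l ≤ r)
    (hrn : r ≤ (P.toList.length : Int)) (hle : pvC P Q r - pvC P Q l ≤ K)
    (hmin : ∀ p : Int, 0 ≤ p → p < l → K < pvC P Q r - pvC P Q p) :
    pvTerm P Q K r = r - l := by
  unfold pvTerm
  rw [pvCnt_get P Q r (by omega) hrn]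
  congr 1
  apply pvBisect_eq (pvCnt P Q) (P.toList.length : Int) (pvC P Q r - K) l _ _
    (r - 0).toNat 0 r rfl (by omega) h0 hlr hrn
  · intro p hp0 hpl
    rw [pvCnt_get P Q p hp0 (by omega)]
    have := hmin p hp0 hpl
    omega
  · intro p hpl hpn
    rw [pvCnt_get P Q p (by omega) hpn]
    have := pvC_mono P Q l p hpl
    omega

lemma pvLoop1_spec (P Q : String) (K : Int) (hK : 0 < K) :
    ∀ (m : Nat) (right : Int), ((P.toList.length : Int) - right).toNat = m →
    ∀ l count ans, 0 ≤ l → l ≤ right → right ≤ (P.toList.length : Int) →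
    count = pvC P Q right - pvC P Q l → count ≤ K →
    (∀ p : Int, 0 ≤ p → p < l → ∀ r', right < r' → r' ≤ (P.toList.length : Int) →
      K < pvC P Q r' - pvC P Q p) →
    ∃ rb, right ≤ rb ∧ rb ≤ (P.toList.length : Int) ∧
      pvLoop1 P Q K (P.toList.length : Int) l right count ans =
        (rb, pvC P Q rb - pvC P Q l,
          (PySem.List.pyRange (right + 1) (rb + 1) 1).foldl
            (fun a r => max a (pvTerm P Q K r)) ans) ∧
      (rb = (P.toList.length : Int) ∨
        (pvC P Q rb - pvC P Q l = K ∧ rb < (P.toList.length : Int) ∧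
          pvIsZero Q (pvOrdAt P rb - 97) = true)) ∧
      (count < K → right < (P.toList.length : Int) → right < rb) := by
  intro m
  induction m with
  | zero =>
    intro right hm l count ans h0 hlr hrn hcnt hcntK hmin
    have hre : right = (P.toList.length : Int) := by omega
    refine ⟨right, le_refl _, hrn, ?_, Or.inl hre, by omega⟩
    rw [pvLoop1, dif_neg (by omega), PySem.List.pyRange_one_eq_nil (by omega)]
    simp [hcnt]
  | succ m ih =>
    intro right hm l count ans h0 hlr hrn hcnt hcntK hmin
    by_cases hcond : right < (P.toList.length : Int) ∧ count ≤ K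
    · rw [pvLoop1, dif_pos hcond]
      dsimp only
      have hrn' : right.toNat < P.toList.length := by omega
      have hek := pvNormAt_eq P Q right (by omega) hcond.1
      have hstep := pvC_step P Q right (by omega) hcond.1
      by_cases hbr : pvIsZero Q (pvOrdAt P right - 97) = true ∧ count + 1 > K
      · rw [if_pos hbr]
        refine ⟨right, le_refl _, hrn, ?_, Or.inr ⟨by omega, hcond.1, hbr.1⟩, by omega⟩
        rw [PySem.List.pyRange_one_eq_nil (by omega)]
        simp [hcnt]
      · rw [if_neg hbr]
        have hcnt' : (if pvIsZero Q (pvOrdAt P right - 97) then count + 1 else count) =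
            pvC P Q (right + 1) - pvC P Q l := by
          by_cases hb : pvIsZero Q (pvOrdAt P right - 97) = true
          · rw [if_pos hb, hstep, if_pos (hek ▸ hb)]
            omega
          · rw [if_neg hb, hstep, if_neg (fun hc => hb (hek ▸ hc))]
            omega
        have hcntK' : (if pvIsZero Q (pvOrdAt P right - 97) then count + 1 else count) ≤ K := by
          split_ifs with hb
          · by_contra hc
            exact hbr ⟨hb, by omega⟩
          · omega
        rw [if_pos hcntK']
        have hterm : right + 1 - l = pvTerm P Q K (right + 1) := by
          rw [pvTerm_eq P Q K l (right + 1) h0 (by omega) (by omega) (by omega)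
            (fun p hp0 hpl => hmin p hp0 hpl (right + 1) (by omega) (by omega))]
        obtain ⟨rb, h1, h2, heq, hexit, -⟩ := ih (right + 1) (by omega) l
          (if pvIsZero Q (pvOrdAt P right - 97) then count + 1 else count)
          (max ans (right + 1 - l))
          h0 (by omega) (by omega) hcnt' hcntK'
          (fun p hp0 hpl r' hr1 hr2 => hmin p hp0 hpl r' (by omega) hr2)
        refine ⟨rb, by omega, h2, ?_, hexit, fun _ _ => by omega⟩
        rw [heq, hterm]
        rw [PySem.List.pyRange_one_cons (show right + 1 < rb + 1 by omega),
          List.foldl_cons]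
    · have hre : right = (P.toList.length : Int) := by omega
      refine ⟨right, le_refl _, hrn, ?_, Or.inl hre, by omega⟩
      rw [pvLoop1, dif_neg hcond, PySem.List.pyRange_one_eq_nil (by omega)]
      simp [hcnt]

lemma pvLoop2_spec (P Q : String) (K : Int) (hK : 0 < K) (right : Int)
    (hrn : right ≤ (P.toList.length : Int)) :
    ∀ (m : Nat) (l : Int), (right - l).toNat = m →
    ∀ count, 0 ≤ l → l ≤ right → count = pvC P Q right - pvC P Q l →
    (∀ p : Int, 0 ≤ p → p < l → K ≤ pvC P Q right - pvC P Q p) →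
    ∃ l', l ≤ l' ∧ l' ≤ right ∧
      pvLoop2 P Q K right l count = (l', pvC P Q right - pvC P Q l') ∧
      (∀ p : Int, 0 ≤ p → p < l' → K ≤ pvC P Q right - pvC P Q p) ∧
      pvC P Q right - pvC P Q l' < K := by
  intro m
  induction m with
  | zero =>
    intro l hm count h0 hlr hcnt hmin
    have hle : l = right := by omega
    refine ⟨l, le_refl _, hlr, ?_, hmin, by rw [hle]; omega⟩
    rw [pvLoop2, dif_neg (by omega), hcnt]
  | succ m ih =>
    intro l hm count h0 hlr hcnt hmin
    by_cases hcond : l < right ∧ count ≥ K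
    · rw [pvLoop2, dif_pos hcond]
      have hek := pvNormAt_eq P Q l h0 (by omega)
      have hstep := pvC_step P Q l h0 (by omega)
      have hcnt' : (if pvIsZero Q (pvOrdAt P l - 97) then count - 1 else count) =
          pvC P Q right - pvC P Q (l + 1) := by
        by_cases hb : pvIsZero Q (pvOrdAt P l - 97) = true
        · rw [if_pos hb, hstep, if_pos (hek ▸ hb)]
          omega
        · rw [if_neg hb, hstep, if_neg (fun hc => hb (hek ▸ hc))]
          omega
      obtain ⟨l', h1, h2, heq, hmin', hfin⟩ := ih (l + 1) (by omega)
        (if pvIsZero Q (pvOrdAt P l - 97) then count - 1 else count)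
        (by omega) (by omega) hcnt'
        (fun p hp0 hpl => by
          rcases lt_or_ge p l with hpl' | hpl'
          · exact hmin p hp0 hpl'
          · have hpe : p = l := by omega
            rw [hpe, ← hcnt]
            omega)
      exact ⟨l', by omega, h2, heq, hmin', hfin⟩
    · refine ⟨l, le_refl _, hlr, ?_, hmin, ?_⟩
      · rw [pvLoop2, dif_neg hcond, hcnt]
      · rcases (not_and_or.mp hcond) with hc | hc
        · have hle : l = right := by omega
          rw [hle]
          omega
        · omega

lemma pvOuter_spec (P Q : String) (K : Int) (hK : 0 < K) :
    ∀ (fuel : Nat) (l right count ans : Int),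
    ((P.toList.length : Int) - right).toNat < fuel →
    0 ≤ l → l ≤ right → right ≤ (P.toList.length : Int) →
    count = pvC P Q right - pvC P Q l → count < K →
    (∀ p : Int, 0 ≤ p → p < l → ∀ r', right < r' → r' ≤ (P.toList.length : Int) →
      K < pvC P Q r' - pvC P Q p) →
    pvOuter P Q K (P.toList.length : Int) fuel l right count ans =
      (PySem.List.pyRange (right + 1) ((P.toList.length : Int) + 1) 1).foldl
        (fun a r => max a (pvTerm P Q K r)) ans := by
  intro fuel
  induction fuel with
  | zero =>
    intro l right count ans hfuel
    exact absurd hfuel (by omega)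
  | succ fuel ih =>
    intro l right count ans hfuel h0 hlr hrn hcnt hcntK hmin
    by_cases hrlt : right < (P.toList.length : Int)
    · obtain ⟨rb, hrb1, hrb2, heq1, hexit, hprog⟩ := pvLoop1_spec P Q K hK
        ((P.toList.length : Int) - right).toNat right rfl l count ans
        h0 hlr hrn hcnt (le_of_lt hcntK) hmin
      have hrbgt : right < rb := hprog hcntK hrlt
      obtain ⟨l', hl1, hl2, heq2, hmin2', hfin⟩ := pvLoop2_spec P Q K hK rb hrb2
        (rb - l).toNat l rfl (pvC P Q rb - pvC P Q l) h0 (by omega) rfl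
        (fun p hp0 hpl => le_of_lt (hmin p hp0 hpl rb (by omega) hrb2))
      have hmin'' : ∀ p : Int, 0 ≤ p → p < l' → ∀ r', rb < r' →
          r' ≤ (P.toList.length : Int) → K < pvC P Q r' - pvC P Q p := by
        intro p hp0 hpl r' hr1 hr2
        rcases hexit with hre | ⟨-, hrblt, hnorm⟩
        · omega
        · have hek := pvNormAt_eq P Q rb (by omega) hrblt
          have hstep := pvC_step P Q rb (by omega) hrblt
          rw [if_pos (hek ▸ hnorm)] at hstep
          have hmono := pvC_mono P Q (rb + 1) r' (by omega)
          have := hmin2' p hp0 hpl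
          omega
      have hrec := ih l' rb (pvC P Q rb - pvC P Q l')
        ((PySem.List.pyRange (right + 1) (rb + 1) 1).foldl
          (fun a r => max a (pvTerm P Q K r)) ans)
        (by omega) (by omega) hl2 hrb2 rfl hfin hmin''
      rw [pvOuter, if_pos hrlt]
      dsimp only
      rw [heq1]
      dsimp only
      rw [heq2]
      dsimp only
      rw [hrec,
        PySem.List.pyRange_one_append (right + 1) (rb + 1) ((P.toList.length : Int) + 1)
          (by omega) (by omega),
        List.foldl_append]
    · rw [pvOuter, if_neg hrlt,
        PySem.List.pyRange_one_eq_nil (by omega)]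
      rfl

-- ===== VERDICT (by name: the statement is the Claim_ definition above) =====
theorem maxNormalSubstring_spec : Claim_equal_maxNormalSubstring := by
  intro P Q K hDom hPre
  unfold Spec_maxNormalSubstring maxNormalSubstring maxNormalSubstring_alt
  by_cases hK0 : K = 0
  · rw [if_pos hK0, if_pos hK0]
  · rw [if_neg hK0, if_neg hK0]
    have hcases : 0 < K ∨ P.toList = [] := by
      rcases hPre with h | h | h
      · exact absurd h hK0
      · exact Or.inr h
      · exact Or.inl h.1
    rcases hcases with hK | hP
    · rw [pvOuter_spec P Q K hK (P.toList.length + 1) 0 0 0 0 (by omega) (by omega)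
        (by omega) (by omega) (by simp [pvC]) hK (fun p hp0 hpl => by omega)]
      simp only [pvTerm]
      norm_num
    · rw [hP]
      simp [pvOuter, PySem.List.pyRange_one_eq_nil]
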